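-- pv_equiv track=rewrite | github.com/mbclause/Python-Exercises | string exercises/4.py | sort_case
-- ===== SOURCE A (Python) =====
-- def sort_case(str):
--     lower = ""
--
--     upper = ""
--
--     for char in str:
--         if(char.islower()):
--             lower = lower + char
--
--         else:
--             upper = upper + char
--
--     res = lower + upper
--
--     return res
-- ===== SOURCE B (Python) =====
-- def sort_case(str):
--     return ''.join(sorted(str, key=lambda c: 0 if c.islower() else 1))
-- ===== Notes on version B (the rewrite author's own statement) =====
-- stated objective: idiomatic
-- what changed: Replaces the two-accumulator concatenation loop with a single stable sort on a binary case key (lowercase=0, other=1), so stability reproduces the partition order exactly.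
import Mathlib
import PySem

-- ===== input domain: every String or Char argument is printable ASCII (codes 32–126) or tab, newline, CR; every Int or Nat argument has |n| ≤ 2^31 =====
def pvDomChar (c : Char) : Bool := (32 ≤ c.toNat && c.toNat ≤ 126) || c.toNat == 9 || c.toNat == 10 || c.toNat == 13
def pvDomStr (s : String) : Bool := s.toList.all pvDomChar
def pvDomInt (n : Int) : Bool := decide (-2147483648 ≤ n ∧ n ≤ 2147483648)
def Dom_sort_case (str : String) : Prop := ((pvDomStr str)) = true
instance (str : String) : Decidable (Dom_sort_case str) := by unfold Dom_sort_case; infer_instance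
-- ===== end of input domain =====

-- B replaces A's two-accumulator concatenation loop with one stable sort on a binary case key (idiomatic rewrite, same return value).


-- ===== PORT A =====
-- the loop's state: (lower, upper) as lists of chars; string concatenation = list append
def sort_case (str : String) : String :=
  let r := str.toList.foldl
    (fun (acc : List Char × List Char) char =>
      if PySem.Chars.islower char then (acc.1 ++ [char], acc.2) else (acc.1, acc.2 ++ [char]))
    ([], [])
  String.mk (r.1 ++ r.2)

-- ===== PORT B =====
-- ''.join(sorted(str, key=lambda c: 0 if c.islower() else 1))
def sort_case_alt (str : String) : String :=
  String.mk (PySem.List.sorted str.toList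
    (fun c => if PySem.Chars.islower c then (0 : Int) else 1) false)

-- ===== PRECONDITION & SPEC =====
def Spec_sort_case (str : String) (out : String) : Prop := out = sort_case_alt str
instance (str : String) (out : String) : Decidable (Spec_sort_case str out) := by unfold Spec_sort_case; infer_instance

-- ===== CLAIM (what is proved, stated in full; the proofs are below) =====
def Claim_equal_sort_case : Prop := ∀ (str : String), Dom_sort_case str → Spec_sort_case str (sort_case str)

-- ===== LEMMAS AND PROOFS =====

def pvKey (c : Char) : Int := if PySem.Chars.islower c then 0 else 1

-- inserting x before the first element satisfying `before`, when the prefix never satisfies it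
-- and the suffix starts with one that does (or is empty), lands exactly between them
theorem insertBy_partition {α : Type} (before : α → α → Bool) (x : α) (l h : List α)
    (hl : ∀ y ∈ l, before x y = false)
    (hh : ∀ y ∈ h, before x y = true) :
    PySem.List.insertBy before x (l ++ h) = l ++ x :: h := by
  induction l with
  | nil =>
    cases h with
    | nil => rfl
    | cons y ys =>
      simp [PySem.List.insertBy, hh y (by simp)]
  | cons a l' ih =>
    simp [PySem.List.insertBy, hl a (by simp)]
    exact ih (fun y hy => hl y (by simp [hy]))

theorem foldl_insert_eq_partition (xs l h : List Char)
    (hl : ∀ c ∈ l, PySem.Chars.islower c = true)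
    (hh : ∀ c ∈ h, PySem.Chars.islower c = false) :
    xs.foldl (fun acc x => PySem.List.insertBy (fun a b => decide (pvKey a < pvKey b)) x acc) (l ++ h)
      = (xs.foldl
          (fun (acc : List Char × List Char) char =>
            if PySem.Chars.islower char then (acc.1 ++ [char], acc.2) else (acc.1, acc.2 ++ [char]))
          (l, h)).1
        ++
        (xs.foldl
          (fun (acc : List Char × List Char) char =>
            if PySem.Chars.islower char then (acc.1 ++ [char], acc.2) else (acc.1, acc.2 ++ [char]))
          (l, h)).2 := by
  induction xs generalizing l h with
  | nil => simp
  | cons x xs ih =>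
    by_cases hx : PySem.Chars.islower x = true
    · have hins : PySem.List.insertBy (fun a b => decide (pvKey a < pvKey b)) x (l ++ h)
          = l ++ x :: h := by
        apply insertBy_partition
        · intro y hy; simp [pvKey, hx, hl y hy]
        · intro y hy; simp [pvKey, hx, hh y hy]
      have : l ++ x :: h = (l ++ [x]) ++ h := by simp
      simp only [List.foldl_cons, hx, if_true, hins, this]
      exact ih (l ++ [x])  h
        (fun c hc => by rcases List.mem_append.mp hc with h1 | h1
                        · exact hl c h1
                        · simp at h1; simpa [h1] using hx) hh
    · have hx' : PySem.Chars.islower x = false := by simpa using hx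
      have hins : PySem.List.insertBy (fun a b => decide (pvKey a < pvKey b)) x (l ++ h)
          = (l ++ h) ++ [x] := by
        apply PySem.List.insertBy_of_forall_not_before
        intro y hy
        by_cases hy2 : PySem.Chars.islower y = true <;> simp [pvKey, hx', hy2]
      simp only [List.foldl_cons, hx', hins, List.append_assoc]
      exact ih l (h ++ [x]) hl
        (fun c hc => by rcases List.mem_append.mp hc with h1 | h1
                        · exact hh c h1
                        · simp at h1; simpa [h1] using hx')

-- ===== VERDICT (by name: the statement is the Claim_ definition above) =====
theorem sort_case_spec : Claim_equal_sort_case := by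
  intro str _
  unfold Spec_sort_case sort_case sort_case_alt
  have h := PySem.List.sorted_eq_foldl_insertBy str.toList pvKey
  have hmain := foldl_insert_eq_partition str.toList [] []
    (by simp) (by simp)
  simp only [List.nil_append] at hmain
  have : PySem.List.sorted str.toList (fun c => if PySem.Chars.islower c then (0 : Int) else 1) false
      = PySem.List.sorted str.toList pvKey false := by
    unfold pvKey; rfl
  rw [this, h, hmain]
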